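-- pv_equiv track=rewrite | github.com/alexandraback/datacollection | solutions_5636311922769920_1/Python/Serkesh/fract.py | fract
-- ===== SOURCE A (Python) =====
-- def fract(L):
--     k,c,s = L[0], L[1], L[2]
--     if (k > s*c):
--         return " IMPOSSIBLE"
--     L = ""
--     i = 0
--     while(i < k):
--         aux = 1
--         for ind in range(c):
--             if (i+ind)>=k :
--                 break
--             aux += (i+ind)*k**(min(k,c)-ind-1)
--         L+= " "+str(aux)
--         i+=c
--     return L
-- ===== SOURCE B (Python) =====
-- def fract(L):
--     k, c, s = L[0], L[1], L[2]
--     if k > s * c: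
--         return " IMPOSSIBLE"
--     if k <= 0:
--         return ""
--     m = min(k, c)
--     out = []
--     for lo in range(0, k, c):
--         hi = min(lo + c, k)
--         h = 0
--         for d in range(lo, hi):
--             h = h * k + d
--         out.append(" " + str(1 + h * k ** (m + lo - hi)))
--     return "".join(out)
-- ===== Notes on version B (the rewrite author's own statement) =====
-- stated objective: alternative
-- what changed: Each block sum is computed by Horner's rule (h = h*k + d per element, one final shift by k**(m-blocklen)) instead of summing per-term powers (i+ind)*k**(m-ind-1), blocks are enumerated by range(0,k,c) instead of a while loop with an inner break, and the output is joined from a list instead of repeated string concatenation.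
import Mathlib
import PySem

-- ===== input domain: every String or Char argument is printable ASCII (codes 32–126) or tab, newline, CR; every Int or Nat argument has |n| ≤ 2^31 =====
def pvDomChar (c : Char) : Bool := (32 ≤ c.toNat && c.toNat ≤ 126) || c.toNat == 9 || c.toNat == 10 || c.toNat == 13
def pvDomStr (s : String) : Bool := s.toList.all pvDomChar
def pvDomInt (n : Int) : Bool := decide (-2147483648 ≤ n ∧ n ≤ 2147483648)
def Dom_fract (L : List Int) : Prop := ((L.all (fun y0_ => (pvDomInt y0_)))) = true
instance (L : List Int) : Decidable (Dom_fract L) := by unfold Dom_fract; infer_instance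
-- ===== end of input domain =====

-- B computes each block sum by Horner's rule with one final shift, enumerates blocks with
-- range(0,k,c) and joins the parts, instead of A's while loop summing per-term powers.

-- ===== PORT A =====
-- inner 'for ind in range(c)' with its break; the exponent is nonnegative on every executed
-- iteration (ind < min(k,c) there), so '.toNat' is exact where the Python evaluates '**'
def fractInner (k c i : Int) (inds : List Int) (aux : Int) : Int :=
  match inds with
  | [] => aux
  | ind :: rest =>
      if i + ind ≥ k then aux
      else fractInner k c i rest (aux + (i + ind) * k ^ (min k c - ind - 1).toNat)

-- outer 'while i < k' with step c; fuel k.toNat bounds the iteration count whenever the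
-- Python loop terminates (Pre_ guarantees 0 < c there, so at most k iterations happen)
def fractLoop (k c : Int) (fuel : Nat) (i : Int) (acc : String) : String :=
  match fuel with
  | 0 => acc
  | f + 1 =>
      if i < k then
        fractLoop k c f (i + c)
          (acc ++ " " ++ PySem.Int.toStr (fractInner k c i (PySem.List.pyRange 0 c 1) 1))
      else acc

def fract (L : List Int) : String :=
  let k := PySem.List.pyGetD L 0 0
  let c := PySem.List.pyGetD L 1 0
  let s := PySem.List.pyGetD L 2 0
  if k > s * c then " IMPOSSIBLE"
  else fractLoop k c k.toNat 0 ""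

-- ===== PORT B =====
-- body of B's outer 'for lo in range(0, k, c)': Horner over the block digits, then one shift;
-- the exponent m + lo - hi is nonnegative for every lo range(0,k,c) yields with 0 < c
-- (hi - lo = min(c, k - lo) ≤ min(c,k) = m there), so '.toNat' is exact where Python takes '**'
def fractPart (k c m lo : Int) : String :=
  let hi := min (lo + c) k
  let h := (PySem.List.pyRange lo hi 1).foldl (fun h d => h * k + d) 0
  " " ++ PySem.Int.toStr (1 + h * k ^ (m + lo - hi).toNat)

def fract_alt (L : List Int) : String :=
  let k := PySem.List.pyGetD L 0 0
  let c := PySem.List.pyGetD L 1 0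
  let s := PySem.List.pyGetD L 2 0
  if k > s * c then " IMPOSSIBLE"
  else if k ≤ 0 then ""
  else
    let m := min k c
    String.join ((PySem.List.pyRange 0 k c).foldl
      (fun out lo => out ++ [fractPart k c m lo]) [])

-- ===== PRECONDITION & SPEC =====
-- Pre_ excludes exactly the inputs on which A does not return: lists shorter than 3
-- (IndexError) and k > 0, k ≤ s*c with c ≤ 0, where the while loop never advances to k
def Pre_fract (L : List Int) : Prop :=
  3 ≤ L.length ∧
  (PySem.List.pyGetD L 0 0 ≤ PySem.List.pyGetD L 2 0 * PySem.List.pyGetD L 1 0 →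
    PySem.List.pyGetD L 0 0 ≤ 0 ∨ 0 < PySem.List.pyGetD L 1 0)
instance (L : List Int) : Decidable (Pre_fract L) := by unfold Pre_fract; infer_instance
def pvWitness_fract : List Int := [5, 2, 4]
def Spec_fract (L : List Int) (out : String) : Prop := out = fract_alt L
instance (L : List Int) (out : String) : Decidable (Spec_fract L out) := by unfold Spec_fract; infer_instance

-- ===== CLAIM (what is proved, stated in full; the proofs are below) =====
def Claim_equal_fract : Prop := ∀ (L : List Int), Dom_fract L → Pre_fract L → Spec_fract L (fract L)

-- ===== LEMMAS AND PROOFS =====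

theorem foldl_str_append (l : List String) : ∀ (x y : String),
    l.foldl (· ++ ·) (x ++ y) = x ++ l.foldl (· ++ ·) y := by
  induction l with
  | nil => intro x y; rfl
  | cons a t ih => intro x y; simpa [String.append_assoc] using ih x (y ++ a)

theorem join_cons (a : String) (l : List String) : String.join (a :: l) = a ++ String.join l := by
  show (a :: l).foldl (· ++ ·) "" = _
  have h : "" ++ a = a ++ "" := by simp
  simp only [List.foldl_cons, h, foldl_str_append]
  rfl

theorem fractLoop_shift (k c : Int) (fuel : Nat) :
    ∀ (i : Int) (a b : String), fractLoop k c fuel i (a ++ b) = a ++ fractLoop k c fuel i b := by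
  induction fuel with
  | zero => intro i a b; rfl
  | succ f ih =>
      intro i a b
      by_cases h : i < k
      · simp only [fractLoop, if_pos h, String.append_assoc, ih]
      · simp [fractLoop, if_neg h]

theorem fractLoop_append (k c : Int) (fuel : Nat) (i : Int) (acc : String) :
    fractLoop k c fuel i acc = acc ++ fractLoop k c fuel i "" := by
  have : acc = acc ++ "" := by simp
  rw [this, fractLoop_shift]; simp

-- cons form of range(a, b, s) for a positive step s
theorem pyRange_pos_cons (a b s : Int) (hs : 0 < s) (hab : a < b) :
    PySem.List.pyRange a b s = a :: PySem.List.pyRange (a + s) b s := by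
  rw [PySem.List.pyRange_of_pos a b hs, PySem.List.pyRange_of_pos (a + s) b hs]
  have hcount : (if a < b then ((b - a + s - 1) / s).toNat else 0)
      = (if a + s < b then ((b - (a + s) + s - 1) / s).toNat else 0) + 1 := by
    rw [if_pos hab]
    by_cases h2 : a + s < b
    · rw [if_pos h2]
      have hd : (b - a + s - 1) / s = (b - a - 1) / s + 1 := by
        have := Int.add_mul_ediv_right (b - a - 1) 1 (by omega : s ≠ 0)
        rw [show b - a + s - 1 = b - a - 1 + s from by ring]; simpa using this
      have hnn : 0 ≤ (b - a - 1) / s := Int.ediv_nonneg (by omega) (by omega)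
      rw [hd, show b - (a + s) + s - 1 = b - a - 1 from by ring]
      omega
    · rw [if_neg h2]
      have hz : (b - a - 1) / s = 0 := Int.ediv_eq_zero_of_lt (by omega) (by omega)
      have hd : (b - a + s - 1) / s = (b - a - 1) / s + 1 := by
        have := Int.add_mul_ediv_right (b - a - 1) 1 (by omega : s ≠ 0)
        rw [show b - a + s - 1 = b - a - 1 + s from by ring]; simpa using this
      omega
  rw [hcount, List.range_succ_eq_map, List.map_cons, List.map_map]
  refine congrArg₂ _ (by simp) ?_
  refine List.map_congr_left ?_
  intro x _
  simp only [Function.comp]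
  push_cast
  ring

-- Horner's loop started from h equals h shifted plus the loop started from 0
theorem horner_shift (k : Int) (l : List Int) : ∀ (h : Int),
    l.foldl (fun h d => h * k + d) h = h * k ^ l.length + l.foldl (fun h d => h * k + d) 0 := by
  induction l with
  | nil => intro h; simp
  | cons d t ih =>
      intro h
      simp only [List.foldl_cons, List.length_cons]
      rw [ih (h * k + d), ih (0 * k + d)]
      ring

-- A's inner power-sum loop from index t equals Horner over the remaining block digits,
-- shifted by k^(m - e) where e is the block length
theorem inner_eq_horner (k c lo : Int) (hc : 0 < c) (hlo : 0 ≤ lo) (hlk : lo < k) :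
    ∀ (n : Nat) (t a : Int), 0 ≤ t → t ≤ min (lo + c) k - lo → (min (lo + c) k - lo - t).toNat ≤ n →
      fractInner k c lo (PySem.List.pyRange t c 1) a
        = a + ((PySem.List.pyRange (lo + t) (min (lo + c) k) 1).foldl (fun h d => h * k + d) 0)
              * k ^ (min k c - (min (lo + c) k - lo)).toNat := by
  intro n
  induction n with
  | zero =>
      intro t a ht hte hn
      have hte' : t = min (lo + c) k - lo := by omega
      subst hte'
      rw [PySem.List.pyRange_one_eq_nil (by omega :
        min (lo + c) k ≤ lo + (min (lo + c) k - lo))]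
      by_cases hec : min (lo + c) k - lo = c
      · rw [hec, PySem.List.pyRange_one_eq_nil (le_refl c)]
        simp [fractInner]
      · rw [PySem.List.pyRange_one_cons (by omega : min (lo + c) k - lo < c)]
        simp only [fractInner]
        rw [if_pos (by omega : lo + (min (lo + c) k - lo) ≥ k)]
        simp
  | succ n ih =>
      intro t a ht hte hn
      by_cases htend : t = min (lo + c) k - lo
      · exact ih t a ht hte (by omega)
      · have hte2 : t < min (lo + c) k - lo := by omega
        have hbk : ¬ (lo + t ≥ k) := by omega
        rw [PySem.List.pyRange_one_cons (by omega : t < c)]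
        simp only [fractInner, if_neg hbk]
        rw [ih (t + 1) _ (by omega) (by omega) (by omega)]
        rw [PySem.List.pyRange_one_cons (by omega : lo + t < min (lo + c) k), List.foldl_cons]
        rw [horner_shift k _ (0 * k + (lo + t))]
        have hlen : (PySem.List.pyRange (lo + t + 1) (min (lo + c) k) 1).length
            = (min (lo + c) k - lo - t - 1).toNat := by
          rw [PySem.List.length_pyRange_one]; congr 1; omega
        have hexp : (min k c - t - 1).toNat
            = (min (lo + c) k - lo - t - 1).toNat + (min k c - (min (lo + c) k - lo)).toNat := by
          omega
        rw [hlen, hexp, pow_add, show lo + (t + 1) = lo + t + 1 from by ring]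
        ring

-- the outer loops agree: the joined Horner blocks over range(lo,k,c) = A's while loop
theorem main_lemma (k c : Int) (hc : 0 < c) :
    ∀ (fuel : Nat) (lo : Int), 0 ≤ lo → k ≤ lo + c * fuel →
      String.join ((PySem.List.pyRange lo k c).map (fractPart k c (min k c)))
        = fractLoop k c fuel lo "" := by
  intro fuel
  induction fuel with
  | zero =>
      intro lo hlo hk'
      rw [show PySem.List.pyRange lo k c = [] from by
        rw [PySem.List.pyRange_of_pos lo k hc, if_neg (by omega : ¬ lo < k)]; rfl]
      rfl
  | succ f ih =>
      intro lo hlo hk'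
      by_cases hlk : lo < k
      · have hfuel : k ≤ (lo + c) + c * f := by
          have : ((f : Int) + 1) = ((f + 1 : Nat) : Int) := by push_cast; ring
          nlinarith [hk', this]
        rw [pyRange_pos_cons lo k c hc hlk, List.map_cons, join_cons,
          ih (lo + c) (by omega) hfuel]
        have hpart : fractPart k c (min k c) lo
            = " " ++ PySem.Int.toStr (fractInner k c lo (PySem.List.pyRange 0 c 1) 1) := by
          rw [inner_eq_horner k c lo hc hlo hlk (min (lo + c) k - lo).toNat 0 1 le_rfl
            (by omega) (by omega)]
          unfold fractPart
          simp only [add_zero]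
          rw [show min k c + lo - min (lo + c) k = min k c - (min (lo + c) k - lo) from by ring]
        rw [hpart]
        simp only [fractLoop, if_pos hlk]
        rw [fractLoop_append k c f (lo + c)
          ("" ++ " " ++ PySem.Int.toStr (fractInner k c lo (PySem.List.pyRange 0 c 1) 1))]
        simp [String.append_assoc]
      · rw [show PySem.List.pyRange lo k c = [] from by
          rw [PySem.List.pyRange_of_pos lo k hc, if_neg hlk]; rfl]
        simp only [fractLoop]
        rw [if_neg hlk]
        rfl

-- ===== VERDICT (by name: the statement is the Claim_ definition above) =====
theorem fract_spec : Claim_equal_fract := by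
  intro L _ hpre
  obtain ⟨hlen, hcase⟩ := hpre
  unfold Spec_fract fract fract_alt
  simp only []
  set k := PySem.List.pyGetD L 0 0 with hk
  set c := PySem.List.pyGetD L 1 0 with hc
  set s := PySem.List.pyGetD L 2 0 with hs
  by_cases himp : k > s * c
  · simp [if_pos himp]
  · simp only [if_neg himp]
    by_cases hk0 : k ≤ 0
    · rw [if_pos hk0, show k.toNat = 0 from by omega]
      rfl
    · rw [if_neg hk0]
      have hcpos : 0 < c := by
        rcases hcase (by omega) with h | h
        · omega
        · exact h
      rw [PySem.List.foldl_append_singleton_eq_map (fractPart k c (min k c)) _ [],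
        List.nil_append]
      refine (main_lemma k c hcpos k.toNat 0 le_rfl ?_).symm
      have h1 : (k.toNat : Int) = k := by omega
      nlinarith [h1]
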